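-- pv_equiv track=rewrite | github.com/KAYA-HAI/EMPA-Benchmark-EPMSandbox | empa/rubric/empathy_v2/config.py | compute_initial_deficit
-- ===== SOURCE A (Python) =====
-- from typing import Any, Dict, List, Tuple
--
-- IED_SCORING_KEY: Dict[Tuple[str, int], int] = {
--     # C axis — Cognitive empathy
--     ("C.1", 0): 0,   ("C.1", 1): -2,  ("C.1", 2): -4,  ("C.1", 3): -6,   # Complexity:  standard  (x1.0)
--     ("C.2", 0): 0,   ("C.2", 1): -2,  ("C.2", 2): -4,  ("C.2", 3): -6,   # Depth:       standard  (x1.0)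
--     ("C.3", 0): 0,   ("C.3", 1): -3,  ("C.3", 2): -6,  ("C.3", 3): -9,   # Priority:    priority  (x1.5)
--     # A axis — Affective empathy
--     ("A.1", 0): 0,   ("A.1", 1): -2,  ("A.1", 2): -4,  ("A.1", 3): -6,   # Intensity:   standard  (x1.0)
--     ("A.2", 0): 0,   ("A.2", 1): -4,  ("A.2", 2): -8,  ("A.2", 3): -12,  # Accessibility: core    (x2.0)
--     ("A.3", 0): 0,   ("A.3", 1): -3,  ("A.3", 2): -6,  ("A.3", 3): -9,   # Priority:    priority  (x1.5)
--     # P axis — Motivational empathy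
--     ("P.1", 0): 0,   ("P.1", 1): -2,  ("P.1", 2): -4,  ("P.1", 3): -6,   # Agency:      standard  (x1.0)
--     ("P.2", 0): 0,   ("P.2", 1): -4,  ("P.2", 2): -8,  ("P.2", 3): -12,  # Value:       core      (x2.0)
--     ("P.3", 0): 0,   ("P.3", 1): -3,  ("P.3", 2): -6,  ("P.3", 3): -9,   # Priority:    priority  (x1.5)
-- }
--
-- _IED_INDICATORS = {
--     "C": ["C.1", "C.2", "C.3"],
--     "A": ["A.1", "A.2", "A.3"],
--     "P": ["P.1", "P.2", "P.3"],
-- }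
--
-- def compute_initial_deficit(
--     filled_form: Dict[str, int]
-- ) -> Tuple[float, ...]:
--     result = []
--     for dim_name, indicators in _IED_INDICATORS.items():
--         total = 0
--         for ind in indicators:
--             level = filled_form.get(ind, 0)
--             total += IED_SCORING_KEY.get((ind, level), 0)
--         result.append(total)
--     return tuple(result)
-- ===== SOURCE B (Python) =====
-- # Single pass over the submitted form itself: each entry is classified via a
-- # per-indicator (dimension, weight) spec and accumulated into a totals dict;
-- # unknown keys and out-of-range levels contribute nothing.
-- _SPEC = {
--     "C.1": ("C", -2), "C.2": ("C", -2), "C.3": ("C", -3),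
--     "A.1": ("A", -2), "A.2": ("A", -4), "A.3": ("A", -3),
--     "P.1": ("P", -2), "P.2": ("P", -4), "P.3": ("P", -3),
-- }
--
--
-- def compute_initial_deficit(filled_form):
--     totals = {"C": 0, "A": 0, "P": 0}
--     for key, level in filled_form.items():
--         spec = _SPEC.get(key)
--         if spec is not None and 0 <= level <= 3:
--             dim, weight = spec
--             totals[dim] += weight * level
--     return (totals["C"], totals["A"], totals["P"])
-- ===== Notes on version B (the rewrite author's own statement) =====
-- stated objective: alternative
-- what changed: Inverts the traversal: instead of A's table-driven loop over the fixed per-dimension indicator lists with a 36-entry (indicator, level) scoring-table lookup, B makes a single pass over the form's own entries, classifying each key via a 9-entry (dimension, weight) spec and accumulating weight*level (for levels 0..3) into a per-dimension totals dict.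
import Mathlib
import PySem

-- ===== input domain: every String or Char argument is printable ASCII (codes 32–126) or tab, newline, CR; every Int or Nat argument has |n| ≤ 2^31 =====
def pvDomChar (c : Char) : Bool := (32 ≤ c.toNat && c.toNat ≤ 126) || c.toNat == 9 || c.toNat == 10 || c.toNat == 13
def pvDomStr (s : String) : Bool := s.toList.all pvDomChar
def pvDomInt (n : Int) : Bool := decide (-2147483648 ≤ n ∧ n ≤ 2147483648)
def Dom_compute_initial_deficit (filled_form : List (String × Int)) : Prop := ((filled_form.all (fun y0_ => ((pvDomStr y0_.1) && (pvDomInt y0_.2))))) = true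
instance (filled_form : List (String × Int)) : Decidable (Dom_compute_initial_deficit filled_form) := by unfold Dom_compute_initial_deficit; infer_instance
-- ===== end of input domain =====

-- B makes a single pass over the form's own entries, classifying each key by a per-indicator
-- (dimension, weight) spec, instead of A's table-driven loop over the fixed indicator lists;
-- objective: alternative (same cost on this fixed-size task).

-- ===== PORT A =====
-- IED_SCORING_KEY: Python dict literal with distinct keys, in source order
def pvScoringKey : PySem.Dict (String × Int) Int := PySem.Dict.mk [
  (("C.1", 0), 0), (("C.1", 1), -2), (("C.1", 2), -4), (("C.1", 3), -6),
  (("C.2", 0), 0), (("C.2", 1), -2), (("C.2", 2), -4), (("C.2", 3), -6),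
  (("C.3", 0), 0), (("C.3", 1), -3), (("C.3", 2), -6), (("C.3", 3), -9),
  (("A.1", 0), 0), (("A.1", 1), -2), (("A.1", 2), -4), (("A.1", 3), -6),
  (("A.2", 0), 0), (("A.2", 1), -4), (("A.2", 2), -8), (("A.2", 3), -12),
  (("A.3", 0), 0), (("A.3", 1), -3), (("A.3", 2), -6), (("A.3", 3), -9),
  (("P.1", 0), 0), (("P.1", 1), -2), (("P.1", 2), -4), (("P.1", 3), -6),
  (("P.2", 0), 0), (("P.2", 1), -4), (("P.2", 2), -8), (("P.2", 3), -12),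
  (("P.3", 0), 0), (("P.3", 1), -3), (("P.3", 2), -6), (("P.3", 3), -9)]

-- _IED_INDICATORS: iterated with .items(), so ported as its items list in insertion order
def pvIndicators : List (String × List String) :=
  [("C", ["C.1", "C.2", "C.3"]), ("A", ["A.1", "A.2", "A.3"]), ("P", ["P.1", "P.2", "P.3"])]

def compute_initial_deficit (filled_form : List (String × Int)) : List Int :=
  let d := PySem.Dict.ofList filled_form
  pvIndicators.foldl (fun result p =>
    result ++ [p.2.foldl (fun total ind =>
      total + PySem.Dict.getD pvScoringKey (ind, PySem.Dict.getD d ind 0) 0) 0]) []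

-- ===== PORT B =====
-- _SPEC: per-indicator (dimension, weight)
def pvSpec : PySem.Dict String (String × Int) := PySem.Dict.mk [
  ("C.1", ("C", -2)), ("C.2", ("C", -2)), ("C.3", ("C", -3)),
  ("A.1", ("A", -2)), ("A.2", ("A", -4)), ("A.3", ("A", -3)),
  ("P.1", ("P", -2)), ("P.2", ("P", -4)), ("P.3", ("P", -3))]

-- totals[dim] += weight * level : the key dim is always present in totals, so Dict.modify
-- with default 0 is exact for Python's totals[dim] = totals[dim] + weight * level
def compute_initial_deficit_alt (filled_form : List (String × Int)) : List Int :=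
  let d := PySem.Dict.ofList filled_form
  let totals : PySem.Dict String Int := PySem.Dict.mk [("C", 0), ("A", 0), ("P", 0)]
  let totals := d.items.foldl (fun t p =>
    match PySem.Dict.get? pvSpec p.1 with
    | none => t
    | some (dim, weight) =>
        if 0 ≤ p.2 ∧ p.2 ≤ 3 then t.modify dim 0 (· + weight * p.2) else t) totals
  [totals.getD "C" 0, totals.getD "A" 0, totals.getD "P" 0]

-- ===== PRECONDITION & SPEC =====
def Spec_compute_initial_deficit (filled_form : List (String × Int)) (out : List Int) : Prop := out = compute_initial_deficit_alt filled_form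
instance (filled_form : List (String × Int)) (out : List Int) : Decidable (Spec_compute_initial_deficit filled_form out) := by unfold Spec_compute_initial_deficit; infer_instance

-- ===== CLAIM (what is proved, stated in full; the proofs are below) =====
def Claim_equal_compute_initial_deficit : Prop := ∀ (filled_form : List (String × Int)), Dom_compute_initial_deficit filled_form → Spec_compute_initial_deficit filled_form (compute_initial_deficit filled_form)

-- ===== LEMMAS AND PROOFS =====

-- first-match-or-0 lookup in an association list
def lkD : List (String × Int) → String → Int
  | [], _ => 0
  | (k, v) :: rest, x => if k == x then v else lkD rest x

lemma lkD_not_mem (l : List (String × Int)) (x : String) (h : x ∉ l.map Prod.fst) :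
    lkD l x = 0 := by
  induction l with
  | nil => rfl
  | cons p rest ih =>
    simp only [List.map_cons, List.mem_cons, not_or] at h
    cases p with
    | mk k v =>
      rw [lkD, if_neg (by simp only [beq_iff_eq]; exact fun e => h.1 e.symm)]
      exact ih h.2

lemma getD_mk_eq_lkD (l : List (String × Int)) (x : String) :
    PySem.Dict.getD (PySem.Dict.mk l) x 0 = lkD l x := by
  induction l with
  | nil => simp [PySem.Dict.getD, PySem.Dict.get?, lkD]
  | cons p rest ih =>
    cases p with
    | mk k v =>
      rw [PySem.Dict.getD_eq_get?_getD, PySem.Dict.get?_mk_cons, lkD]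
      by_cases h : k = x
      · simp [h]
      · rw [if_neg (by simpa using h), if_neg (by simpa using h),
          ← PySem.Dict.getD_eq_get?_getD, ih]

-- skipping one non-matching key in a literal dict lookup
lemma get_mk_skip {κ ν : Type} [BEq κ] [LawfulBEq κ] (k : κ) (v : ν) (rest : List (κ × ν))
    (x : κ) (h : k ≠ x) :
    (PySem.Dict.mk ((k, v) :: rest)).get? x = (PySem.Dict.mk rest).get? x := by
  rw [PySem.Dict.get?_mk_cons, if_neg (by simpa using h)]

lemma spec_none (k : String)
    (h : k ∉ (["C.1", "C.2", "C.3", "A.1", "A.2", "A.3", "P.1", "P.2", "P.3"] : List String)) :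
    PySem.Dict.get? pvSpec k = none := by
  simp only [List.mem_cons, not_or] at h
  unfold pvSpec
  repeat rw [get_mk_skip _ _ _ _ (by tauto)]
  simp [PySem.Dict.get?]

-- the per-entry contribution of one form entry to the three dimension totals
def pvDelta (k : String) (v : Int) : Int × Int × Int :=
  match PySem.Dict.get? pvSpec k with
  | none => (0, 0, 0)
  | some (dim, w) =>
      if 0 ≤ v ∧ v ≤ 3 then
        ((if dim = "C" then w * v else 0),
         (if dim = "A" then w * v else 0),
         (if dim = "P" then w * v else 0))
      else (0, 0, 0)

lemma pvDelta_zero (k : String) : pvDelta k 0 = (0, 0, 0) := by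
  unfold pvDelta
  rcases h : PySem.Dict.get? pvSpec k with _ | ⟨dim, w⟩ <;> simp

def readT (t : PySem.Dict String Int) : Int × Int × Int :=
  (t.getD "C" 0, t.getD "A" 0, t.getD "P" 0)

def pvStep (t : PySem.Dict String Int) (p : String × Int) : PySem.Dict String Int :=
  match PySem.Dict.get? pvSpec p.1 with
  | none => t
  | some (dim, weight) =>
      if 0 ≤ p.2 ∧ p.2 ≤ 3 then t.modify dim 0 (· + weight * p.2) else t

lemma read_step (t : PySem.Dict String Int) (p : String × Int) :
    readT (pvStep t p) = (((readT t).1 + (pvDelta p.1 p.2).1,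
      (readT t).2.1 + (pvDelta p.1 p.2).2.1, (readT t).2.2 + (pvDelta p.1 p.2).2.2)) := by
  unfold pvStep pvDelta readT
  rcases h : PySem.Dict.get? pvSpec p.1 with _ | ⟨dim, w⟩
  · simp
  · by_cases hv : 0 ≤ p.2 ∧ p.2 ≤ 3
    · simp only [if_pos hv, PySem.Dict.getD_modify]
      refine Prod.ext ?_ (Prod.ext ?_ ?_) <;>
        · simp only
          split_ifs with h1 h2 h3
          · subst h1; ring
          · exact absurd h1.symm h2
          · exact absurd h3.symm h1
          · ring
    · simp [if_neg hv]

lemma fold_read (l : List (String × Int)) :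
    ∀ t : PySem.Dict String Int, readT (l.foldl pvStep t) =
      ((readT t).1 + (l.map (fun p => (pvDelta p.1 p.2).1)).sum,
       (readT t).2.1 + (l.map (fun p => (pvDelta p.1 p.2).2.1)).sum,
       (readT t).2.2 + (l.map (fun p => (pvDelta p.1 p.2).2.2)).sum) := by
  induction l with
  | nil => intro t; simp
  | cons p rest ih =>
    intro t
    simp only [List.foldl_cons, ih, read_step, List.map_cons, List.sum_cons]
    refine Prod.ext (by simp; ring) (Prod.ext (by simp; ring) (by simp; ring))

-- sum of a per-entry component over nodup-keyed entries = its value at the three indicator keys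
lemma sum_comp (c : String → Int → Int) (k1 k2 k3 : String)
    (h12 : k1 ≠ k2) (h13 : k1 ≠ k3) (h23 : k2 ≠ k3)
    (hz : ∀ k, c k 0 = 0)
    (ho : ∀ k v, k ≠ k1 → k ≠ k2 → k ≠ k3 → c k v = 0) :
    ∀ l : List (String × Int), (l.map Prod.fst).Nodup →
      (l.map (fun p => c p.1 p.2)).sum = c k1 (lkD l k1) + c k2 (lkD l k2) + c k3 (lkD l k3) := by
  intro l
  induction l with
  | nil => intro _; simp [lkD, hz]
  | cons p rest ih =>
    intro hnd
    cases p with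
    | mk k v =>
      simp only [List.map_cons, List.nodup_cons] at hnd
      have hnm : k ∉ rest.map Prod.fst := hnd.1
      have ihr := ih hnd.2
      simp only [List.map_cons, List.sum_cons, ihr, lkD]
      by_cases e1 : k = k1
      · subst e1
        rw [if_pos (by simp), if_neg (by simpa using h12), if_neg (by simpa using h13),
          lkD_not_mem rest k hnm, hz]
        ring
      · rw [if_neg (by simpa using e1)]
        by_cases e2 : k = k2
        · subst e2
          rw [if_pos (by simp), if_neg (by simpa using h23),
            lkD_not_mem rest k hnm, hz]
          ring
        · rw [if_neg (by simpa using e2)]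
          by_cases e3 : k = k3
          · subst e3
            rw [if_pos (by simp), lkD_not_mem rest k hnm, hz]
            ring
          · rw [if_neg (by simpa using e3), ho k v e1 e2 e3]
            ring

-- each scoring-table column is the guarded linear function of the level
lemma key_eval (ind : String) (w : Int)
    (hw : (ind, w) ∈ ([("C.1", -2), ("C.2", -2), ("C.3", -3), ("A.1", -2), ("A.2", -4),
      ("A.3", -3), ("P.1", -2), ("P.2", -4), ("P.3", -3)] : List (String × Int))) (l : Int) :
    PySem.Dict.getD pvScoringKey (ind, l) 0 = if 0 ≤ l ∧ l ≤ 3 then w * l else 0 := by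
  rcases (by omega : l = 0 ∨ l = 1 ∨ l = 2 ∨ l = 3 ∨ (l < 0 ∨ 3 < l)) with rfl|rfl|rfl|rfl|h
  · fin_cases hw <;> decide
  · fin_cases hw <;> decide
  · fin_cases hw <;> decide
  · fin_cases hw <;> decide
  · rw [if_neg (by omega)]
    unfold pvScoringKey
    rw [PySem.Dict.getD]
    repeat rw [get_mk_skip _ _ _ _ (by simp; omega)]
    simp [PySem.Dict.get?]

-- delta components at the nine indicator keys are the guarded weight * level
lemma delta_at (k : String) (w : Int) (i : Fin 3) (v : Int)
    (hk : PySem.Dict.get? pvSpec k = some ((["C", "A", "P"] : List String)[i], w)) :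
    (fun t : Int × Int × Int => match i with | 0 => t.1 | 1 => t.2.1 | 2 => t.2.2) (pvDelta k v)
      = if 0 ≤ v ∧ v ≤ 3 then w * v else 0 := by
  fin_cases i <;> · simp only [pvDelta, hk]; split_ifs <;> simp_all

-- outside the nine indicator keys every component is zero
lemma delta_out (k : String) (v : Int)
    (h1 : k ≠ "C.1") (h2 : k ≠ "C.2") (h3 : k ≠ "C.3")
    (h4 : k ≠ "A.1") (h5 : k ≠ "A.2") (h6 : k ≠ "A.3")
    (h7 : k ≠ "P.1") (h8 : k ≠ "P.2") (h9 : k ≠ "P.3") :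
    pvDelta k v = (0, 0, 0) := by
  unfold pvDelta
  rw [spec_none k (by simp_all)]

-- component .1 of pvDelta vanishes off the C indicators
lemma delta_fst_out (k : String) (v : Int)
    (h1 : k ≠ "C.1") (h2 : k ≠ "C.2") (h3 : k ≠ "C.3") : (pvDelta k v).1 = 0 := by
  by_cases e : k = "A.1"; · subst e; simp only [pvDelta, show PySem.Dict.get? pvSpec "A.1" = some ("A", -2) from by decide]; split_ifs <;> simp_all
  by_cases e : k = "A.2"; · subst e; simp only [pvDelta, show PySem.Dict.get? pvSpec "A.2" = some ("A", -4) from by decide]; split_ifs <;> simp_all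
  by_cases e : k = "A.3"; · subst e; simp only [pvDelta, show PySem.Dict.get? pvSpec "A.3" = some ("A", -3) from by decide]; split_ifs <;> simp_all
  by_cases e : k = "P.1"; · subst e; simp only [pvDelta, show PySem.Dict.get? pvSpec "P.1" = some ("P", -2) from by decide]; split_ifs <;> simp_all
  by_cases e : k = "P.2"; · subst e; simp only [pvDelta, show PySem.Dict.get? pvSpec "P.2" = some ("P", -4) from by decide]; split_ifs <;> simp_all
  by_cases e : k = "P.3"; · subst e; simp only [pvDelta, show PySem.Dict.get? pvSpec "P.3" = some ("P", -3) from by decide]; split_ifs <;> simp_all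
  rw [delta_out k v h1 h2 h3 (by assumption) (by assumption) (by assumption) (by assumption) (by assumption) (by assumption)]

lemma delta_snd_out (k : String) (v : Int)
    (h1 : k ≠ "A.1") (h2 : k ≠ "A.2") (h3 : k ≠ "A.3") : (pvDelta k v).2.1 = 0 := by
  by_cases e : k = "C.1"; · subst e; simp only [pvDelta, show PySem.Dict.get? pvSpec "C.1" = some ("C", -2) from by decide]; split_ifs <;> simp_all
  by_cases e : k = "C.2"; · subst e; simp only [pvDelta, show PySem.Dict.get? pvSpec "C.2" = some ("C", -2) from by decide]; split_ifs <;> simp_all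
  by_cases e : k = "C.3"; · subst e; simp only [pvDelta, show PySem.Dict.get? pvSpec "C.3" = some ("C", -3) from by decide]; split_ifs <;> simp_all
  by_cases e : k = "P.1"; · subst e; simp only [pvDelta, show PySem.Dict.get? pvSpec "P.1" = some ("P", -2) from by decide]; split_ifs <;> simp_all
  by_cases e : k = "P.2"; · subst e; simp only [pvDelta, show PySem.Dict.get? pvSpec "P.2" = some ("P", -4) from by decide]; split_ifs <;> simp_all
  by_cases e : k = "P.3"; · subst e; simp only [pvDelta, show PySem.Dict.get? pvSpec "P.3" = some ("P", -3) from by decide]; split_ifs <;> simp_all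
  rw [delta_out k v (by assumption) (by assumption) (by assumption) h1 h2 h3 (by assumption) (by assumption) (by assumption)]

lemma delta_trd_out (k : String) (v : Int)
    (h1 : k ≠ "P.1") (h2 : k ≠ "P.2") (h3 : k ≠ "P.3") : (pvDelta k v).2.2 = 0 := by
  by_cases e : k = "C.1"; · subst e; simp only [pvDelta, show PySem.Dict.get? pvSpec "C.1" = some ("C", -2) from by decide]; split_ifs <;> simp_all
  by_cases e : k = "C.2"; · subst e; simp only [pvDelta, show PySem.Dict.get? pvSpec "C.2" = some ("C", -2) from by decide]; split_ifs <;> simp_all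
  by_cases e : k = "C.3"; · subst e; simp only [pvDelta, show PySem.Dict.get? pvSpec "C.3" = some ("C", -3) from by decide]; split_ifs <;> simp_all
  by_cases e : k = "A.1"; · subst e; simp only [pvDelta, show PySem.Dict.get? pvSpec "A.1" = some ("A", -2) from by decide]; split_ifs <;> simp_all
  by_cases e : k = "A.2"; · subst e; simp only [pvDelta, show PySem.Dict.get? pvSpec "A.2" = some ("A", -4) from by decide]; split_ifs <;> simp_all
  by_cases e : k = "A.3"; · subst e; simp only [pvDelta, show PySem.Dict.get? pvSpec "A.3" = some ("A", -3) from by decide]; split_ifs <;> simp_all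
  rw [delta_out k v (by assumption) (by assumption) (by assumption) (by assumption) (by assumption) (by assumption) h1 h2 h3]

-- ===== VERDICT (by name: the statement is the Claim_ definition above) =====
theorem compute_initial_deficit_spec : Claim_equal_compute_initial_deficit := by
  intro fm _
  unfold Spec_compute_initial_deficit compute_initial_deficit compute_initial_deficit_alt
  simp only [pvIndicators, List.foldl]
  have hmk : PySem.Dict.mk (PySem.Dict.ofList fm).items = PySem.Dict.ofList fm :=
    PySem.Dict.ext rfl
  have hlk : forall x : String,
      lkD (PySem.Dict.ofList fm).items x = PySem.Dict.getD (PySem.Dict.ofList fm) x 0 := by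
    intro x; rw [← getD_mk_eq_lkD, hmk]
  have hnd : ((PySem.Dict.ofList fm).items.map Prod.fst).Nodup := by
    have h := PySem.Dict.nodup_keys_ofList fm
    simpa [PySem.Dict.keys] using h
  have hC := congrArg (fun t : Int × Int × Int => t.1)
    (fold_read (PySem.Dict.ofList fm).items (PySem.Dict.mk [("C", 0), ("A", 0), ("P", 0)]))
  have hA := congrArg (fun t : Int × Int × Int => t.2.1)
    (fold_read (PySem.Dict.ofList fm).items (PySem.Dict.mk [("C", 0), ("A", 0), ("P", 0)]))
  have hP := congrArg (fun t : Int × Int × Int => t.2.2)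
    (fold_read (PySem.Dict.ofList fm).items (PySem.Dict.mk [("C", 0), ("A", 0), ("P", 0)]))
  simp only [readT] at hC hA hP
  rw [show (PySem.Dict.mk [("C", 0), ("A", 0), ("P", 0)] : PySem.Dict String Int).getD "C" 0 = 0 from by decide, zero_add] at hC
  rw [show (PySem.Dict.mk [("C", 0), ("A", 0), ("P", 0)] : PySem.Dict String Int).getD "A" 0 = 0 from by decide, zero_add] at hA
  rw [show (PySem.Dict.mk [("C", 0), ("A", 0), ("P", 0)] : PySem.Dict String Int).getD "P" 0 = 0 from by decide, zero_add] at hP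
  rw [show (fun (t : PySem.Dict String Int) (p : String × Int) =>
        match pvSpec.get? p.1 with
        | none => t
        | some (dim, weight) => if 0 ≤ p.2 ∧ p.2 ≤ 3 then t.modify dim 0 fun x => x + weight * p.2 else t)
      = pvStep from rfl, hC, hA, hP,
    sum_comp (fun k v => (pvDelta k v).1) "C.1" "C.2" "C.3" (by decide) (by decide) (by decide)
      (by intro k; simp only []; rw [pvDelta_zero]) delta_fst_out _ hnd,
    sum_comp (fun k v => (pvDelta k v).2.1) "A.1" "A.2" "A.3" (by decide) (by decide) (by decide)
      (by intro k; simp only []; rw [pvDelta_zero]) delta_snd_out _ hnd,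
    sum_comp (fun k v => (pvDelta k v).2.2) "P.1" "P.2" "P.3" (by decide) (by decide) (by decide)
      (by intro k; simp only []; rw [pvDelta_zero]) delta_trd_out _ hnd]
  simp only [hlk]
  have eC1 : (pvDelta "C.1" (PySem.Dict.getD (PySem.Dict.ofList fm) "C.1" 0)).1
      = if 0 ≤ PySem.Dict.getD (PySem.Dict.ofList fm) "C.1" 0 ∧ PySem.Dict.getD (PySem.Dict.ofList fm) "C.1" 0 ≤ 3
        then -2 * PySem.Dict.getD (PySem.Dict.ofList fm) "C.1" 0 else 0 :=
    delta_at "C.1" (-2) 0 _ (by decide)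
  have eC2 : (pvDelta "C.2" (PySem.Dict.getD (PySem.Dict.ofList fm) "C.2" 0)).1
      = if 0 ≤ PySem.Dict.getD (PySem.Dict.ofList fm) "C.2" 0 ∧ PySem.Dict.getD (PySem.Dict.ofList fm) "C.2" 0 ≤ 3
        then -2 * PySem.Dict.getD (PySem.Dict.ofList fm) "C.2" 0 else 0 :=
    delta_at "C.2" (-2) 0 _ (by decide)
  have eC3 : (pvDelta "C.3" (PySem.Dict.getD (PySem.Dict.ofList fm) "C.3" 0)).1
      = if 0 ≤ PySem.Dict.getD (PySem.Dict.ofList fm) "C.3" 0 ∧ PySem.Dict.getD (PySem.Dict.ofList fm) "C.3" 0 ≤ 3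
        then -3 * PySem.Dict.getD (PySem.Dict.ofList fm) "C.3" 0 else 0 :=
    delta_at "C.3" (-3) 0 _ (by decide)
  have eA1 : (pvDelta "A.1" (PySem.Dict.getD (PySem.Dict.ofList fm) "A.1" 0)).2.1
      = if 0 ≤ PySem.Dict.getD (PySem.Dict.ofList fm) "A.1" 0 ∧ PySem.Dict.getD (PySem.Dict.ofList fm) "A.1" 0 ≤ 3
        then -2 * PySem.Dict.getD (PySem.Dict.ofList fm) "A.1" 0 else 0 :=
    delta_at "A.1" (-2) 1 _ (by decide)
  have eA2 : (pvDelta "A.2" (PySem.Dict.getD (PySem.Dict.ofList fm) "A.2" 0)).2.1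
      = if 0 ≤ PySem.Dict.getD (PySem.Dict.ofList fm) "A.2" 0 ∧ PySem.Dict.getD (PySem.Dict.ofList fm) "A.2" 0 ≤ 3
        then -4 * PySem.Dict.getD (PySem.Dict.ofList fm) "A.2" 0 else 0 :=
    delta_at "A.2" (-4) 1 _ (by decide)
  have eA3 : (pvDelta "A.3" (PySem.Dict.getD (PySem.Dict.ofList fm) "A.3" 0)).2.1
      = if 0 ≤ PySem.Dict.getD (PySem.Dict.ofList fm) "A.3" 0 ∧ PySem.Dict.getD (PySem.Dict.ofList fm) "A.3" 0 ≤ 3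
        then -3 * PySem.Dict.getD (PySem.Dict.ofList fm) "A.3" 0 else 0 :=
    delta_at "A.3" (-3) 1 _ (by decide)
  have eP1 : (pvDelta "P.1" (PySem.Dict.getD (PySem.Dict.ofList fm) "P.1" 0)).2.2
      = if 0 ≤ PySem.Dict.getD (PySem.Dict.ofList fm) "P.1" 0 ∧ PySem.Dict.getD (PySem.Dict.ofList fm) "P.1" 0 ≤ 3
        then -2 * PySem.Dict.getD (PySem.Dict.ofList fm) "P.1" 0 else 0 :=
    delta_at "P.1" (-2) 2 _ (by decide)
  have eP2 : (pvDelta "P.2" (PySem.Dict.getD (PySem.Dict.ofList fm) "P.2" 0)).2.2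
      = if 0 ≤ PySem.Dict.getD (PySem.Dict.ofList fm) "P.2" 0 ∧ PySem.Dict.getD (PySem.Dict.ofList fm) "P.2" 0 ≤ 3
        then -4 * PySem.Dict.getD (PySem.Dict.ofList fm) "P.2" 0 else 0 :=
    delta_at "P.2" (-4) 2 _ (by decide)
  have eP3 : (pvDelta "P.3" (PySem.Dict.getD (PySem.Dict.ofList fm) "P.3" 0)).2.2
      = if 0 ≤ PySem.Dict.getD (PySem.Dict.ofList fm) "P.3" 0 ∧ PySem.Dict.getD (PySem.Dict.ofList fm) "P.3" 0 ≤ 3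
        then -3 * PySem.Dict.getD (PySem.Dict.ofList fm) "P.3" 0 else 0 :=
    delta_at "P.3" (-3) 2 _ (by decide)
  rw [eC1, eC2, eC3, eA1, eA2, eA3, eP1, eP2, eP3,
    key_eval "C.1" (-2) (by simp), key_eval "C.2" (-2) (by simp), key_eval "C.3" (-3) (by simp),
    key_eval "A.1" (-2) (by simp), key_eval "A.2" (-4) (by simp), key_eval "A.3" (-3) (by simp),
    key_eval "P.1" (-2) (by simp), key_eval "P.2" (-4) (by simp), key_eval "P.3" (-3) (by simp)]
  simp
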